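-- pv_equiv track=rewrite | github.com/TheRolf/MVTSP_exact | mvtsp_exact/tools/degree_sequences.py | combination_to_sequence
-- ===== SOURCE A (Python) =====
-- def combination_to_sequence(array, r):
--     M = len(array)
--     result = [0 for i in range(M+1)]
--     result[0] = array[0]
--     for i in range(1, M):
--         result[i] = array[i]-array[i-1]-1
--     result[M] = r + M - array[M-1] - 1
--     return result
-- ===== SOURCE B (Python) =====
-- def combination_to_sequence(array, r):
--     # Divide and conquer: the gap list of a combination between bounds (lo, hi)
--     # splits at any chosen element m into the gap lists of the two halves.
--     def gaps(lo, hi, sub):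
--         if not sub:
--             return [hi - lo - 1]
--         k = len(sub) // 2
--         m = sub[k]
--         return gaps(lo, m, sub[:k]) + gaps(m, hi, sub[k + 1:])
--     return gaps(-1, r + len(array), array)
-- ===== Notes on version B (the rewrite author's own statement) =====
-- stated objective: alternative
-- what changed: Replaces A's left-to-right indexed loop over a preallocated array (with special-cased first and last cells) by a divide-and-conquer recursion that splits at the middle chosen element and concatenates the gap lists of the two halves between sentinels -1 and r+M; Pre_ excludes only the empty list, where A raises IndexError.
import Mathlib
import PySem

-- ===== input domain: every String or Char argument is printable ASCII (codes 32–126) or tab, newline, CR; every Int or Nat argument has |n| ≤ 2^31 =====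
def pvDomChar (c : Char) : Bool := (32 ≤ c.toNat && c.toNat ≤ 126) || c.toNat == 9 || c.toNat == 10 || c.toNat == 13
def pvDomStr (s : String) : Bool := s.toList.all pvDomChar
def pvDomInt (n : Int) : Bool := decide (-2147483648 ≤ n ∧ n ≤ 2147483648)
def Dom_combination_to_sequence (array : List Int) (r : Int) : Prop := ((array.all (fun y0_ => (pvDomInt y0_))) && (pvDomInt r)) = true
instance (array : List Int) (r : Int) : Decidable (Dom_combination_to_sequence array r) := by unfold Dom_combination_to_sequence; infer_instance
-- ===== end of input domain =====

-- B replaces A's left-to-right indexed loop over a preallocated array by a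
-- divide-and-conquer recursion splitting at the middle chosen element between
-- sentinels -1 and r+M (objective: alternative, same values, different recursion structure).

-- ===== PORT A =====
def combination_to_sequence (array : List Int) (r : Int) : List Int :=
  let M : Int := (array.length : Int)
  let result : List Int := (PySem.List.pyRange 0 (M + 1) 1).map (fun _ => (0 : Int))
  let result := PySem.List.pySetD result 0 (PySem.List.pyGetD array 0 0)
  let result := (PySem.List.pyRange 1 M 1).foldl
    (fun res i => PySem.List.pySetD res i
      (PySem.List.pyGetD array i 0 - PySem.List.pyGetD array (i - 1) 0 - 1)) result
  PySem.List.pySetD result M (r + M - PySem.List.pyGetD array (M - 1) 0 - 1)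

-- ===== PORT B =====
-- Source B's recursive helper `gaps(lo, hi, sub)`; the extra Nat argument is pure
-- fuel making the divide-and-conquer recursion structural (fuel = sub.length
-- always suffices, the 0/nonempty branch is unreachable from the entry point).
def pvGapsF : Nat → Int → Int → List Int → List Int
  | _, lo, hi, [] => [hi - lo - 1]
  | 0, lo, hi, _ => [hi - lo - 1]
  | fuel + 1, lo, hi, sub =>
    let k := sub.length / 2
    let m := sub.getD k 0
    pvGapsF fuel lo m (sub.take k) ++ pvGapsF fuel m hi (sub.drop (k + 1))

def combination_to_sequence_alt (array : List Int) (r : Int) : List Int :=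
  pvGapsF array.length (-1) (r + (array.length : Int)) array

-- ===== PRECONDITION & SPEC =====
-- Pre_ excludes exactly the empty list, on which Python A raises IndexError (array[0]).
def Pre_combination_to_sequence (array : List Int) (r : Int) : Prop := array ≠ []
instance (array : List Int) (r : Int) : Decidable (Pre_combination_to_sequence array r) := by unfold Pre_combination_to_sequence; infer_instance
def pvWitness_combination_to_sequence : List Int × Int := ([0, 2, 3], 4)

def Spec_combination_to_sequence (array : List Int) (r : Int) (out : List Int) : Prop := out = combination_to_sequence_alt array r
instance (array : List Int) (r : Int) (out : List Int) : Decidable (Spec_combination_to_sequence array r out) := by unfold Spec_combination_to_sequence; infer_instance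

-- ===== CLAIM (what is proved, stated in full; the proofs are below) =====
def Claim_equal_combination_to_sequence : Prop := ∀ (array : List Int) (r : Int), Dom_combination_to_sequence array r → Pre_combination_to_sequence array r → Spec_combination_to_sequence array r (combination_to_sequence array r)

-- ===== LEMMAS AND PROOFS =====

-- Successive differences minus one: the common characterisation both ports are reduced to.
def pvDiffsL : List Int → List Int
  | a :: b :: t => (b - a - 1) :: pvDiffsL (b :: t)
  | _ => []

lemma pvDiffsL_split : ∀ (xs : List Int) (x m : Int) (ys : List Int),
    pvDiffsL (x :: (xs ++ [m])) ++ pvDiffsL (m :: ys) = pvDiffsL (x :: (xs ++ m :: ys)) := by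
  intro xs
  induction xs with
  | nil => intro x m ys; simp [pvDiffsL]
  | cons y t ih =>
    intro x m ys
    simp only [List.cons_append, pvDiffsL] at *
    simp [ih y]

lemma pvGapsF_eq_diffsL :
    ∀ (fuel : Nat) (sub : List Int), sub.length ≤ fuel → ∀ (lo hi : Int),
      pvGapsF fuel lo hi sub = pvDiffsL (lo :: sub ++ [hi]) := by
  intro fuel
  induction fuel with
  | zero =>
    intro sub hlen lo hi
    have : sub = [] := List.length_eq_zero_iff.mp (Nat.le_zero.mp hlen)
    subst this; simp [pvGapsF, pvDiffsL]
  | succ f ih =>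
    intro sub hlen lo hi
    match sub with
    | [] => simp [pvGapsF, pvDiffsL]
    | a :: t =>
      simp only [pvGapsF]
      set s : List Int := a :: t with hs
      have hslen : 1 ≤ s.length := by simp [hs]
      set k := s.length / 2 with hk
      have hklt : k < s.length := by omega
      have hm : s.getD k 0 = s[k]'hklt := by
        rw [List.getD_eq_getElem?_getD, List.getElem?_eq_getElem hklt]; rfl
      rw [ih (s.take k) (by simp [List.length_take]; omega) lo (s.getD k 0),
          ih (s.drop (k + 1)) (by simp [List.length_drop]; omega) (s.getD k 0) hi]
      have hrecomb : s.take k ++ s.getD k 0 :: s.drop (k + 1) = s := by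
        rw [hm]
        conv_rhs => rw [← List.take_append_drop k s]
        congr 1
        exact (List.getElem_cons_drop hklt)
      simp only [List.cons_append]
      rw [pvDiffsL_split (s.take k) lo (s.getD k 0) (s.drop (k + 1) ++ [hi])]
      congr 2
      calc List.take k s ++ s.getD k 0 :: (List.drop (k + 1) s ++ [hi])
          = (List.take k s ++ s.getD k 0 :: List.drop (k + 1) s) ++ [hi] := by simp
        _ = s ++ [hi] := by rw [hrecomb]

lemma altB_eq_diffsL (array : List Int) (r : Int) :
    combination_to_sequence_alt array r
      = pvDiffsL ((-1) :: array ++ [r + (array.length : Int)]) := by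
  exact pvGapsF_eq_diffsL array.length array le_rfl _ _

lemma pvDiffsL_eq_zip : ∀ (l : List Int),
    pvDiffsL l = (l.zip l.tail).map (fun p => p.2 - p.1 - 1) := by
  intro l
  match l with
  | [] => rfl
  | [a] => rfl
  | a :: b :: t =>
    simp only [pvDiffsL, List.tail_cons, List.zip_cons_cons, List.map_cons]
    rw [pvDiffsL_eq_zip (b :: t)]
    rfl

lemma length_foldl_setD (g : Int → Int) (l : List Int) (res : List Int) :
    (l.foldl (fun res i => PySem.List.pySetD res i (g i)) res).length = res.length := by
  induction l generalizing res with
  | nil => rfl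
  | cons a t ih => simp [List.foldl, ih, PySem.List.length_pySetD]

lemma foldl_setD_getElem? (g : Int → Int) :
    ∀ (n : Nat) (a b : Int) (res : List Int), (b - a).toNat = n → 0 ≤ a → b ≤ (res.length : Int) →
    ∀ j : Nat,
      ((PySem.List.pyRange a b 1).foldl (fun res i => PySem.List.pySetD res i (g i)) res)[j]?
        = if a ≤ (j : Int) ∧ (j : Int) < b then some (g j) else res[j]? := by
  intro n
  induction n with
  | zero =>
    intro a b res hn ha hb j
    rw [PySem.List.pyRange_one_eq_nil (by omega)]
    simp only [List.foldl_nil]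
    rw [if_neg (by omega)]
  | succ n ih =>
    intro a b res hn ha hb j
    rw [PySem.List.pyRange_one_cons (by omega), List.foldl_cons]
    rw [ih (a + 1) b _ (by omega) (by omega)
        (by rw [PySem.List.length_pySetD]; exact hb) j]
    rw [PySem.List.pySetD_of_nonneg _ _ ha]
    by_cases h : a + 1 ≤ (j : Int) ∧ (j : Int) < b
    · rw [if_pos h, if_pos (by omega)]
    · rw [if_neg h]
      by_cases hj : (j : Int) = a
      · rw [if_pos (by omega)]
        have hja : a.toNat = j := by omega
        subst hja
        rw [List.getElem?_set_self (by omega)]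
        congr 2
        omega
      · rw [if_neg (by omega)]
        rw [List.getElem?_set_ne (by omega)]

-- The value of A at index j, via getElem?.
lemma portA_getElem? (array : List Int) (r : Int) (h : array ≠ []) (j : Nat) :
    (combination_to_sequence array r)[j]? =
      if j = array.length then some (r + array.length - array.getD (array.length - 1) 0 - 1)
      else if j = 0 then (if array.length = 0 then none else some (array.getD 0 0))
      else if j < array.length then
        some (array.getD j 0 - array.getD (j - 1) 0 - 1)
      else none := by
  have hM : 1 ≤ array.length := List.length_pos_iff.mpr h
  simp only [combination_to_sequence]
  rw [PySem.List.pySetD_natCast]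
  have hlen0 : ((PySem.List.pyRange 0 ((array.length : Int) + 1) 1).map (fun _ => (0:Int))).length
      = array.length + 1 := by
    rw [List.length_map, PySem.List.length_pyRange_one]; omega
  have hlenfold : ((PySem.List.pyRange 1 (array.length : Int) 1).foldl
      (fun res i => PySem.List.pySetD res i
        (PySem.List.pyGetD array i 0 - PySem.List.pyGetD array (i - 1) 0 - 1))
      (PySem.List.pySetD ((PySem.List.pyRange 0 ((array.length : Int) + 1) 1).map (fun _ => (0:Int))) 0
        (PySem.List.pyGetD array 0 0))).length = array.length + 1 := by
    rw [length_foldl_setD, PySem.List.length_pySetD, hlen0]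
  by_cases hj : j = array.length
  · subst hj
    rw [List.getElem?_set_self (by rw [hlenfold]; omega)]
    rw [if_pos rfl]
    have h1 : ((array.length : Int) - 1) = ((array.length - 1 : Nat) : Int) := by omega
    rw [h1, PySem.List.pyGetD_natCast]
  · rw [List.getElem?_set_ne (by omega)]
    rw [foldl_setD_getElem? _ (array.length - 1) 1 (array.length : Int) _ (by omega)
        (by omega) (by rw [PySem.List.length_pySetD, hlen0]; omega) j]
    by_cases hj0 : j = 0
    · subst hj0
      rw [if_neg (by omega), if_pos rfl, if_neg (by omega)]
      rw [PySem.List.pySetD_of_nonneg _ _ le_rfl]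
      simp only [Int.toNat_zero]
      rw [List.getElem?_set_self (by rw [hlen0]; omega)]
      rw [PySem.List.pyGetD_zero, if_neg (by omega)]
    · by_cases hjM : j < array.length
      · rw [if_pos (by omega), if_neg hj, if_neg hj0, if_pos hjM]
        have h1 : ((j : Int) - 1) = ((j - 1 : Nat) : Int) := by omega
        rw [h1, PySem.List.pyGetD_natCast, PySem.List.pyGetD_natCast]
      · rw [if_neg (by omega), if_neg hj, if_neg hj0, if_neg hjM]
        rw [PySem.List.pySetD_of_nonneg _ _ le_rfl]
        simp only [Int.toNat_zero]
        rw [List.getElem?_set_ne (by omega)]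
        rw [List.getElem?_eq_none (by rw [hlen0]; omega)]

lemma zipdiff_length (array : List Int) (r : Int) :
    ((((-1) :: array ++ [r + (array.length : Int)]).zip
      ((-1) :: array ++ [r + (array.length : Int)]).tail).map
        (fun p => p.2 - p.1 - 1)).length = array.length + 1 := by
  simp

lemma zipdiff_getElem (array : List Int) (r : Int) (j : Nat) (hj : j < array.length + 1) :
    ((((-1) :: array ++ [r + (array.length : Int)]).zip
      ((-1) :: array ++ [r + (array.length : Int)]).tail).map
        (fun p => p.2 - p.1 - 1))[j]'(by rw [zipdiff_length]; omega) =
      ((((-1) :: array ++ [r + (array.length : Int)]))[j + 1]'(by simp; omega))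
      - ((((-1) :: array ++ [r + (array.length : Int)]))[j]'(by simp; omega)) - 1 := by
  rw [List.getElem_map, List.getElem_zip, List.getElem_tail]

lemma ext_get_zero (x e : Int) (l : List Int) (hp : 0 < (x :: l ++ [e]).length) :
    (x :: l ++ [e])[0]'hp = x := rfl

lemma ext_get_mid (x e : Int) (l : List Int) (j : Nat) (h1 : 1 ≤ j) (h2 : j ≤ l.length)
    (hp : j < (x :: l ++ [e]).length) :
    (x :: l ++ [e])[j]'hp = l[j - 1]'(by omega) := by
  obtain ⟨k, rfl⟩ : ∃ k, j = k + 1 := ⟨j - 1, by omega⟩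
  have hk : k < l.length := by omega
  simp [List.getElem_cons_succ, hk]

lemma ext_get_last (x e : Int) (l : List Int) (hp : l.length + 1 < (x :: l ++ [e]).length) :
    (x :: l ++ [e])[l.length + 1]'hp = e := by
  simp [List.getElem_cons_succ]

-- ===== VERDICT (by name: the statement is the Claim_ definition above) =====
theorem combination_to_sequence_spec : Claim_equal_combination_to_sequence := by
  intro array r _ hpre
  unfold Spec_combination_to_sequence
  rw [altB_eq_diffsL, pvDiffsL_eq_zip]
  have hM : 1 ≤ array.length := List.length_pos_iff.mpr hpre
  apply List.ext_getElem?
  intro j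
  rw [portA_getElem? array r hpre j]
  by_cases hj : j < array.length + 1
  · rw [List.getElem?_eq_getElem (by rw [zipdiff_length]; omega)]
    rw [zipdiff_getElem array r j hj]
    by_cases hjM : j = array.length
    · subst hjM
      rw [if_pos rfl, ext_get_last,
        ext_get_mid (-1) (r + (array.length : Int)) array array.length (by omega) le_rfl]
      rw [List.getD_eq_getElem?_getD, List.getElem?_eq_getElem (by omega)]
      simp
    · have hjlt : j < array.length := by omega
      rw [ext_get_mid (-1) (r + (array.length : Int)) array (j + 1) (by omega) (by omega)]
      by_cases hj0 : j = 0
      · subst hj0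
        rw [if_neg (by omega), if_pos rfl, if_neg (by omega), ext_get_zero]
        rw [List.getD_eq_getElem?_getD, List.getElem?_eq_getElem (by omega)]
        simp
      · rw [if_neg hjM, if_neg hj0, if_pos hjlt,
          ext_get_mid (-1) (r + (array.length : Int)) array j (by omega) (by omega)]
        rw [List.getD_eq_getElem?_getD, List.getElem?_eq_getElem (by omega),
          List.getD_eq_getElem?_getD, List.getElem?_eq_getElem (by omega)]
        simp
  · rw [if_neg (by omega), if_neg (by omega), if_neg (by omega)]
    rw [List.getElem?_eq_none (by rw [zipdiff_length]; omega)]
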